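-- pv_equiv track=rewrite | github.com/gh0stintheshe11/LeetCode-Solutions | solutions/1077.confusing-number-ii/Python3.py | confusingNumberII
-- ===== SOURCE A (Python) =====
-- def confusingNumberII(n: int) -> int:
--     valid_digits = ['0', '1', '6', '8', '9']
--     rot_map = {'0': '0', '1': '1', '6': '9', '8': '8', '9': '6'}
--
--     def is_confusing(num):
--         original = str(num)
--         rotated = ''.join(rot_map[ch] for ch in reversed(original))
--         return original != rotated and rotated.lstrip('0') != original
--
--     def dfs(current):
--         if current > n:
--             return 0
--
--         count = 0
--         if current != 0 and is_confusing(current):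
--             count += 1
--
--         for digit in valid_digits:
--             next_num = current * 10 + int(digit)
--             if next_num != 0:  # To avoid leading 0s
--                 count += dfs(next_num)
--
--         return count
--
--     # Starting from each valid digit to avoid leading zeros
--     total_count = 0
--     for digit in valid_digits[1:]:
--         total_count += dfs(int(digit))
--
--     return total_count
-- ===== SOURCE B (Python) =====
-- def confusingNumberII(n: int) -> int:
--     # Enumerate the valid-digit numbers in increasing order via a base-5 counter:
--     # the k-th positive number made only of valid digits is obtained by
--     # rewriting k's base-5 digits through the valid-digit table.  Check "confusing" arithmetically.
--     VAL = (0, 1, 6, 8, 9)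
--     ROT = {0: 0, 1: 1, 6: 9, 8: 8, 9: 6}
--     count = 0
--     k = 1
--     while True:
--         # decode k -> m, the k-th valid-digit number
--         m = 0
--         p = 1
--         t = k
--         while t:
--             m += VAL[t % 5] * p
--             p *= 10
--             t //= 5
--         if m > n:
--             break
--         # rotate m by 180 degrees, numerically
--         r = 0
--         t = m
--         while t:
--             r = r * 10 + ROT[t % 10]
--             t //= 10
--         if r != m:
--             count += 1
--         k += 1
--     return count
-- ===== Notes on version B (the rewrite author's own statement) =====
-- stated objective: faster
-- what changed: Replaces A's recursive DFS over the 5-ary tree of valid-digit numbers with string-based rotation tests by a single flat loop over a base-5 counter k, decoding k's base-5 digits through the valid-digit table to enumerate the same numbers in increasing order and testing 'confusing' with pure integer arithmetic (no string building, no recursion, no per-node function calls).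
import Mathlib
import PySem

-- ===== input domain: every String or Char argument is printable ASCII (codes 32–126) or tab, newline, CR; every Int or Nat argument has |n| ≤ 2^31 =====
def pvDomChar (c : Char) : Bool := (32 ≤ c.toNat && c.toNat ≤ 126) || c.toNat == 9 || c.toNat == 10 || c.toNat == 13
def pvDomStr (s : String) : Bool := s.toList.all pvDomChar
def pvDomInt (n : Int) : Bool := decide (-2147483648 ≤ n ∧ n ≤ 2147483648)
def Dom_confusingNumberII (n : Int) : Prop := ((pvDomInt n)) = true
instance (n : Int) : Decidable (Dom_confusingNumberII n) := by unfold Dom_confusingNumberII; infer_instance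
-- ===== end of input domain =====

-- B replaces A's recursive DFS over the valid-digit tree (with string-based rotation tests)
-- by a single flat loop over a base-5 counter decoded to the k-th valid-digit number, testing
-- rotations with integer arithmetic only (no strings, no recursion); A is total and the return
-- values agree on every input.

-- ===== PORT A =====
-- rot_map, the digit-rotation table of A
def pvRotMapA : PySem.Dict Char Char :=
  (((((PySem.Dict.empty.insert '0' '0').insert '1' '1').insert '6' '9').insert '8' '8').insert '9' '6')

-- is_confusing(num); rot_map[ch] would raise KeyError off the five valid digit chars but is only
-- ever applied to them (dfs builds numbers from valid digits only): ported as get? with the char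
-- itself as the unreachable default.  s.lstrip('0') is ported by hand as dropping leading '0'
-- chars, which is exact.
def pvIsConfusingA (num : Int) : Bool :=
  let original := PySem.Int.toChars num
  let rotated := (original.reverse).map (fun ch => (pvRotMapA.get? ch).getD ch)
  decide (original ≠ rotated) && decide (List.dropWhile (fun c => c == '0') rotated ≠ original)

-- dfs(current); the fuel argument only makes the recursion structural: the guard `current > n`
-- stops Python's recursion at depth ≤ n.toNat + 1 from any root ≥ 1 (current strictly grows),
-- so with the fuel confusingNumberII passes, the fuel-exhausted branch is never reached.
def pvDfsA (n : Int) : Nat → Int → Int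
  | 0, _ => 0
  | fuel + 1, current =>
    if current > n then 0
    else
      let count : Int := if current ≠ 0 ∧ pvIsConfusingA current = true then 1 else 0
      [(0 : Int), 1, 6, 8, 9].foldl (fun count digit =>
        let next_num := current * 10 + digit
        if next_num ≠ 0 then count + pvDfsA n fuel next_num else count) count

def confusingNumberII (n : Int) : Int :=
  [(1 : Int), 6, 8, 9].foldl (fun total d => total + pvDfsA n (n.toNat + 2) d) 0

-- ===== PORT B =====
-- VAL, the valid-digit tuple of B
def pvVALB : List Int := [0, 1, 6, 8, 9]
-- ROT, the digit-rotation dict of B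
def pvROTB : PySem.Dict Int Int :=
  (((((PySem.Dict.empty.insert 0 0).insert 1 1).insert 6 9).insert 8 8).insert 9 6)

-- "while t: m += VAL[t % 5] * p; p *= 10; t //= 5"  (t stays ≥ 0, kept as Nat)
def pvDecodeGo (t : Nat) (m p : Int) : Int :=
  if t = 0 then m
  else pvDecodeGo (t / 5) (m + ((PySem.List.pyGet? pvVALB ((t % 5 : Nat) : Int)).getD 0) * p) (p * 10)
  termination_by t
  decreasing_by exact Nat.div_lt_self (Nat.pos_of_ne_zero (by assumption)) (by norm_num)

-- "while t: r = r * 10 + ROT[t % 10]; t //= 10"; ROT[t % 10] would raise KeyError off the five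
-- valid digits but t's digits are always valid here: ported as getD with unreachable default 0.
def pvRotGoB (t : Nat) (r : Int) : Int :=
  if t = 0 then r
  else pvRotGoB (t / 10) (r * 10 + pvROTB.getD ((t % 10 : Nat) : Int) 0)
  termination_by t
  decreasing_by exact Nat.div_lt_self (Nat.pos_of_ne_zero (by assumption)) (by norm_num)

-- the outer "while True" loop; k only grows and the k-th valid number is ≥ k, so the break
-- fires before k exceeds n.toNat + 1: with the fuel confusingNumberII_alt passes, the
-- fuel-exhausted branch is never reached.  m ≥ 0 always, so m.toNat is exact.
def pvLoopB (n : Int) : Nat → Nat → Int → Int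
  | 0, _, count => count
  | fuel + 1, k, count =>
    let m := pvDecodeGo k 0 1
    if m > n then count
    else
      let r := pvRotGoB m.toNat 0
      pvLoopB n fuel (k + 1) (if r ≠ m then count + 1 else count)

def confusingNumberII_alt (n : Int) : Int := pvLoopB n (n.toNat + 2) 1 0

-- ===== PRECONDITION & SPEC =====
def Spec_confusingNumberII (n : Int) (out : Int) : Prop := out = confusingNumberII_alt n
instance (n : Int) (out : Int) : Decidable (Spec_confusingNumberII n out) := by unfold Spec_confusingNumberII; infer_instance

-- ===== CLAIM (what is proved, stated in full; the proofs are below) =====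
def Claim_equal_confusingNumberII : Prop := ∀ (n : Int), Dom_confusingNumberII n → Spec_confusingNumberII n (confusingNumberII n)

-- ===== LEMMAS AND PROOFS =====

-- Spec-side vocabulary: pvVD rewrites a base-5 digit to the corresponding valid decimal digit,
-- pvF k is the k-th positive number all of whose decimal digits are valid, pvRot is the numeric
-- 180-degree rotation, pvValid m says every decimal digit of m is valid, and pvS n a b counts
-- the confusing values pvF k <= n for k in [a, b).
def pvVD (d : Nat) : Nat := [0, 1, 6, 8, 9].getD d 0
def pvF (k : Nat) : Nat := Nat.ofDigits 10 ((Nat.digits 5 k).map pvVD)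

lemma pvF_rec (k : Nat) (hk : k ≠ 0) : pvF k = 10 * pvF (k / 5) + pvVD (k % 5) := by
  unfold pvF
  rw [Nat.digits_def' (by norm_num) (Nat.pos_of_ne_zero hk)]
  simp [Nat.ofDigits_cons]
  ring

lemma pvVD_ge (d : Nat) (h : d < 5) : d ≤ pvVD d := by interval_cases d <;> decide
lemma pvVD_lt (d : Nat) (h : d < 5) : pvVD d < 10 := by interval_cases d <;> decide

lemma pvVD_pos (d : Nat) (h0 : d ≠ 0) (h : d < 5) : 1 ≤ pvVD d := by
  interval_cases d <;> simp_all <;> decide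

lemma pvVD_strictMono {d d' : Nat} (h : d < d') (h' : d' < 5) : pvVD d < pvVD d' := by
  interval_cases d' <;> interval_cases d <;> decide

lemma pvF_ge (k : Nat) : k ≤ pvF k := by
  induction k using Nat.strong_induction_on with
  | _ k ih =>
    rcases Nat.eq_zero_or_pos k with h | h
    · simp [h, pvF]
    · have h5 : k / 5 < k := Nat.div_lt_self h (by norm_num)
      have := ih (k / 5) h5
      have hm := pvVD_ge (k % 5) (Nat.mod_lt k (by norm_num))
      rw [pvF_rec k (Nat.pos_iff_ne_zero.mp h)]
      omega

lemma pvF_strictMono {k k' : Nat} (h : k < k') : pvF k < pvF k' := by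
  induction k' using Nat.strong_induction_on generalizing k with
  | _ k' ih =>
    have hk'0 : k' ≠ 0 := by omega
    rw [pvF_rec k' hk'0]
    rcases Nat.eq_zero_or_pos k with hk0 | hk0
    · subst hk0
      rw [pvF]
      simp
      have : 1 ≤ pvVD (k' % 5) ∨ 1 ≤ pvF (k' / 5) := by
        rcases Nat.eq_zero_or_pos (k' / 5) with h5 | h5
        · left
          exact pvVD_pos _ (by omega) (Nat.mod_lt _ (by norm_num))
        · right; exact le_trans h5 (pvF_ge _)
      omega
    · rw [pvF_rec k (by omega)]
      rcases Nat.lt_or_ge (k / 5) (k' / 5) with hq | hq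
      · have hrec : pvF (k / 5) < pvF (k' / 5) := by
          apply ih (k' / 5) (Nat.div_lt_self (by omega) (by norm_num)) hq
        have h1 := pvVD_lt (k % 5) (Nat.mod_lt _ (by norm_num))
        omega
      · have hq' : k / 5 = k' / 5 := by omega
        have hd : k % 5 < k' % 5 := by omega
        have : pvVD (k % 5) < pvVD (k' % 5) :=
          pvVD_strictMono hd (Nat.mod_lt _ (by norm_num))
        rw [hq']
        omega

def pvRD (d : Nat) : Nat := if d = 6 then 9 else if d = 9 then 6 else d
def pvRot (m : Nat) : Nat := Nat.ofDigits 10 (((Nat.digits 10 m).map pvRD).reverse)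
def pvValid (m : Nat) : Prop := ∀ d ∈ Nat.digits 10 m, d = 0 ∨ d = 1 ∨ d = 6 ∨ d = 8 ∨ d = 9

lemma digits_pvF (k : Nat) : Nat.digits 10 (pvF k) = (Nat.digits 5 k).map pvVD := by
  unfold pvF
  apply Nat.digits_ofDigits 10 (by norm_num)
  · intro l hl
    rcases List.mem_map.mp hl with ⟨d, hd, rfl⟩
    exact pvVD_lt d (Nat.digits_lt_base (by norm_num) hd)
  · intro h
    rw [List.getLast_map]
    have hne : Nat.digits 5 k ≠ [] := by
      intro hc; simp [hc] at h
    have := Nat.getLast_digit_ne_zero 5 (m := k) (by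
      intro hc; subst hc; simp at hne)
    intro hc
    have hlt : (Nat.digits 5 k).getLast hne < 5 :=
      Nat.digits_lt_base (by norm_num) (List.getLast_mem hne)
    have h1 := pvVD_pos ((Nat.digits 5 k).getLast hne) this hlt
    omega

lemma pvValid_pvF (k : Nat) : pvValid (pvF k) := by
  intro d hd
  rw [digits_pvF] at hd
  rcases List.mem_map.mp hd with ⟨e, he, rfl⟩
  have := Nat.digits_lt_base (b := 5) (by norm_num) he
  interval_cases e <;> simp [pvVD]

lemma pvF_child (k j : Nat) (hj : j < 5) : pvF (5 * k + j) = 10 * pvF k + pvVD j := by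
  rcases Nat.eq_zero_or_pos (5 * k + j) with h | h
  · have hk : k = 0 := by omega
    have hjj : j = 0 := by omega
    subst hk; subst hjj
    simp [pvF, pvVD]
  · rw [pvF_rec _ (by omega)]
    have h1 : (5 * k + j) / 5 = k := by omega
    have h2 : (5 * k + j) % 5 = j := by omega
    rw [h1, h2]

lemma toDigitsCore_eq (f : Nat) : ∀ (n : Nat) (acc : List Char), 0 < n → n < 10 ^ f →
    Nat.toDigitsCore 10 f n acc = ((Nat.digits 10 n).map Nat.digitChar).reverse ++ acc := by
  induction f with
  | zero => intro n acc h0 hf; omega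
  | succ f ih =>
    intro n acc h0 hf
    rw [Nat.toDigitsCore]
    rw [Nat.digits_def' (b := 10) (by norm_num) h0]
    rcases Nat.eq_zero_or_pos (n / 10) with hq | hq
    · have hd : Nat.digits 10 (n / 10) = [] := by simp [hq]
      simp [hq, hd]
    · have hq0 : ¬ n / 10 = 0 := by omega
      simp only [hq0, if_false]
      rw [ih (n / 10) _ hq (by
        have : n < 10 ^ (f + 1) := hf
        have : n / 10 < 10 ^ f := by
          rw [Nat.div_lt_iff_lt_mul (by norm_num)]
          calc n < 10 ^ (f+1) := hf
          _ = 10 ^ f * 10 := by ring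
        exact this)]
      simp

lemma toChars_eq (m : Nat) (h0 : 0 < m) :
    PySem.Int.toChars (m : Int) = ((Nat.digits 10 m).map Nat.digitChar).reverse := by
  rw [PySem.Int.toChars]
  rw [if_neg (by omega)]
  have : ((m : Int)).toNat = m := rfl
  have hb : m < 10 ^ (m + 1) := by
    have h1 : m < 10 ^ m := Nat.lt_pow_self (by norm_num)
    have h2 : 10 ^ m ≤ 10 ^ (m + 1) := Nat.pow_le_pow_right (by norm_num) (by omega)
    omega
  rw [this, Nat.toDigits, toDigitsCore_eq (m + 1) m [] h0 hb, List.append_nil]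

lemma digitChar_inj_lt (d e : Nat) (hd : d < 10) (he : e < 10)
    (h : Nat.digitChar d = Nat.digitChar e) : d = e := by
  interval_cases d <;> interval_cases e <;> first | rfl | (exfalso; revert h; decide)

lemma digitChar_map_inj {l1 l2 : List Nat} (h1 : ∀ d ∈ l1, d < 10) (h2 : ∀ d ∈ l2, d < 10)
    (h : l1.map Nat.digitChar = l2.map Nat.digitChar) : l1 = l2 := by
  induction l1 generalizing l2 with
  | nil => cases l2 <;> simp_all
  | cons a l ih =>
    cases l2 with
    | nil => simp_all
    | cons b l' =>
      simp only [List.map_cons, List.cons.injEq] at h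
      have := digitChar_inj_lt a b (h1 a (by simp)) (h2 b (by simp)) h.1
      subst this
      rw [ih (fun d hd => h1 d (by simp [hd])) (fun d hd => h2 d (by simp [hd])) h.2]

lemma pvRotChar_eq (d : Nat) (hd : d = 0 ∨ d = 1 ∨ d = 6 ∨ d = 8 ∨ d = 9) :
    (pvRotMapA.get? (Nat.digitChar d)).getD (Nat.digitChar d) = Nat.digitChar (pvRD d) := by
  rcases hd with rfl | rfl | rfl | rfl | rfl <;> decide

lemma pvRD_lt (d : Nat) (hd : d = 0 ∨ d = 1 ∨ d = 6 ∨ d = 8 ∨ d = 9) : pvRD d < 10 := by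
  rcases hd with rfl | rfl | rfl | rfl | rfl <;> decide

lemma pvRD_eq_zero_iff (d : Nat) (hd : d = 0 ∨ d = 1 ∨ d = 6 ∨ d = 8 ∨ d = 9) :
    pvRD d = 0 ↔ d = 0 := by
  rcases hd with rfl | rfl | rfl | rfl | rfl <;> decide

lemma ofDigits_zeros (l : List Nat) (h : ∀ d ∈ l, d = 0) : Nat.ofDigits 10 l = 0 := by
  induction l with
  | nil => simp
  | cons a t ih =>
    simp [Nat.ofDigits_cons, h a (by simp), ih (fun d hd => h d (by simp [hd]))]

lemma pvDropWhile_congr {p q : Nat → Bool} (l : List Nat) (h : ∀ x ∈ l, p x = q x) :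
    List.dropWhile p l = List.dropWhile q l := by
  induction l with
  | nil => rfl
  | cons a t ih =>
    rw [List.dropWhile_cons, List.dropWhile_cons, h a (by simp)]
    split
    · exact ih (fun x hx => h x (by simp [hx]))
    · rfl

lemma pvIsConfusingA_eq (m : Nat) (h0 : 0 < m) (hv : pvValid m) :
    pvIsConfusingA (m : Int) = decide (pvRot m ≠ m) := by
  have hm0 : m ≠ 0 := by omega
  set D := Nat.digits 10 m with hD
  have hDne : D ≠ [] := by simp [hD, Nat.digits_ne_nil_iff_ne_zero, hm0]
  have hDlt : ∀ d ∈ D, d < 10 := fun d hd => Nat.digits_lt_base (by norm_num) hd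
  set dl := D.getLast hDne with hdl
  have hdl? : D.getLast? = some dl := List.getLast?_eq_some_getLast hDne
  have hdlmem : dl ∈ D := List.getLast_mem hDne
  have hdl0 : dl ≠ 0 := Nat.getLast_digit_ne_zero 10 hm0
  have horig : PySem.Int.toChars (m : Int) = (D.map Nat.digitChar).reverse := toChars_eq m h0
  set Lr := D.map pvRD with hLr
  have hLrlt : ∀ d ∈ Lr, d < 10 := by
    intro d hd
    rcases List.mem_map.mp hd with ⟨e, he, rfl⟩
    exact pvRD_lt e (hv e he)
  have hrot : ((D.map Nat.digitChar).reverse.reverse).map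
        (fun ch => (pvRotMapA.get? ch).getD ch) = Lr.map Nat.digitChar := by
    rw [List.reverse_reverse, List.map_map, hLr, List.map_map]
    apply List.map_congr_left
    intro d hd
    exact pvRotChar_eq d (hv d hd)
  set L0 := List.dropWhile (fun d => d == 0) Lr with hL0
  have hstrip : List.dropWhile (fun c => c == '0') (Lr.map Nat.digitChar) =
      L0.map Nat.digitChar := by
    rw [List.dropWhile_map, hL0]
    congr 1
    apply pvDropWhile_congr
    intro d hd
    have := hLrlt d hd
    simp only [Function.comp]
    interval_cases d <;> decide
  have hL0sub : ∀ d ∈ L0, d < 10 := by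
    intro d hd
    exact hLrlt d (List.Sublist.mem hd (List.dropWhile_sublist _))
  have hLrne : Lr ≠ [] := by simp [hLr, hDne]
  have hLrlast? : Lr.getLast? = some (pvRD dl) := by
    rw [hLr, List.getLast?_map, hdl?]
    rfl
  have hLrlast0 : pvRD dl ≠ 0 := by
    rw [Ne, pvRD_eq_zero_iff dl (hv dl hdlmem)]
    exact hdl0
  have hL0ne : L0 ≠ [] := by
    intro hc
    have hall : ∀ d ∈ Lr, d = 0 := by
      intro d hd
      have h1 := List.takeWhile_append_dropWhile (p := fun d => d == 0) (l := Lr)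
      rw [← h1] at hd
      rcases List.mem_append.mp hd with h2 | h2
      · simpa using List.mem_takeWhile_imp h2
      · rw [← hL0, hc] at h2; simp at h2
    have := List.getLast_mem hLrne
    have h2 := List.getLast?_eq_some_getLast hLrne
    rw [hLrlast?] at h2
    have : pvRD dl ∈ Lr := by
      have h3 := List.getLast_mem hLrne
      rwa [← Option.some_inj.mp h2] at h3
    exact hLrlast0 (hall _ this)
  -- head of L0 is nonzero
  obtain ⟨a0, t0, hL0c⟩ : ∃ a t, L0 = a :: t := by
    cases hc : L0 with
    | nil => exact absurd hc hL0ne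
    | cons a t => exact ⟨a, t, rfl⟩
  have ha0 : a0 ≠ 0 := by
    have hne' : Lr.dropWhile (fun d => d == 0) ≠ [] := by rw [← hL0, hL0c]; simp
    have := List.head_dropWhile_not (p := fun d => d == 0) (l := Lr) hne'
    have hh : (Lr.dropWhile (fun d => d == 0)).head? = some a0 := by
      rw [← hL0, hL0c]; rfl
    rw [List.head?_eq_some_head hne'] at hh
    rw [Option.some_inj.mp hh] at this
    simpa using this
  -- value and digits of the rotated string
  have hrotval : pvRot m = Nat.ofDigits 10 L0.reverse := by
    unfold pvRot
    rw [← hD, ← hLr]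
    conv_lhs => rw [← List.takeWhile_append_dropWhile (p := fun d => d == 0) (l := Lr)]
    rw [← hL0, List.reverse_append, Nat.ofDigits_append]
    have hz : Nat.ofDigits 10 (List.takeWhile (fun d => d == 0) Lr).reverse = 0 := by
      apply ofDigits_zeros
      intro d hd
      rw [List.mem_reverse] at hd
      simpa using List.mem_takeWhile_imp hd
    rw [hz]
    simp
  have hrotdigits : Nat.digits 10 (pvRot m) = L0.reverse := by
    rw [hrotval]
    apply Nat.digits_ofDigits 10 (by norm_num)
    · intro d hd; exact hL0sub d (List.mem_reverse.mp hd)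
    · intro h
      have h1 : (L0.reverse).getLast? = some a0 := by
        rw [List.getLast?_reverse, hL0c]; rfl
      rw [List.getLast?_eq_some_getLast h] at h1
      rw [Option.some_inj.mp h1]
      exact ha0
  have hiff : (pvRot m = m) ↔ (L0 = D.reverse) := by
    constructor
    · intro h
      have h1 : Nat.digits 10 (pvRot m) = Nat.digits 10 m := by rw [h]
      rw [hrotdigits, ← hD] at h1
      rw [← h1]
      simp
    · intro h
      have h1 : Nat.ofDigits 10 (Nat.digits 10 (pvRot m)) = Nat.ofDigits 10 D := by
        rw [hrotdigits, h]
        simp [← hD]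
      rw [Nat.ofDigits_digits, hD, Nat.ofDigits_digits] at h1
      exact h1
  unfold pvIsConfusingA
  simp only [horig, hrot, hstrip]
  by_cases hc : L0 = D.reverse
  · have hrfalse : pvRot m = m := hiff.mpr hc
    rw [hc]
    simp [hrfalse]
  · have hrtrue : pvRot m ≠ m := fun h => hc (hiff.mp h)
    have hcond2 : L0.map Nat.digitChar ≠ (D.map Nat.digitChar).reverse := by
      rw [← List.map_reverse]
      intro h
      exact hc (digitChar_map_inj hL0sub (fun d hd => hDlt d (List.mem_reverse.mp hd)) h)
    have hcond1 : (D.map Nat.digitChar).reverse ≠ Lr.map Nat.digitChar := by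
      intro h
      rw [← List.map_reverse] at h
      have hDL : D.reverse = Lr := digitChar_map_inj
        (fun d hd => hDlt d (List.mem_reverse.mp hd)) hLrlt h
      -- Lr then starts with the nonzero digit dl, so the strip is the identity
      have hhead : Lr.head? = some dl := by
        rw [← hDL, List.head?_reverse, hdl?]
      have hL0Lr : L0 = Lr := by
        rw [hL0]
        cases hLrc : Lr with
        | nil => rfl
        | cons a t =>
          rw [hLrc] at hhead
          have ha : a = dl := by simpa using hhead
          rw [List.dropWhile_cons]
          have : ¬ (a == 0) = true := by simp [ha, hdl0]
          simp [this]
      exact hc (hL0Lr.trans hDL.symm)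
    simp [hcond1, hcond2, hrtrue]

def pvS (n : Int) (a b : Nat) : Int :=
  ∑ k ∈ Finset.Ico a b, (if (pvF k : Int) > n then 0 else if pvRot (pvF k) = pvF k then 0 else 1)

lemma pvF_exists_gt (n : Int) : ∃ k, (pvF k : Int) > n := by
  refine ⟨n.toNat + 1, ?_⟩
  have h1 : (n.toNat + 1 : Nat) ≤ pvF (n.toNat + 1) := pvF_ge _
  have h2 : n ≤ (n.toNat : Int) := Int.self_le_toNat n
  have := Nat.cast_le (α := Int) |>.mpr h1
  push_cast at this ⊢
  omega

def pvKstop (n : Int) : Nat := Nat.find (pvF_exists_gt n)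

lemma pvKstop_gt (n : Int) : (pvF (pvKstop n) : Int) > n := Nat.find_spec (pvF_exists_gt n)

lemma pvF_mono {k k' : Nat} (h : k ≤ k') : pvF k ≤ pvF k' := by
  rcases Nat.lt_or_ge k k' with h' | h'
  · exact le_of_lt (pvF_strictMono h')
  · have : k = k' := le_antisymm h h'
    simp [this]

lemma lt_pvKstop_iff (n : Int) (k : Nat) : k < pvKstop n ↔ (pvF k : Int) ≤ n := by
  constructor
  · intro h
    have := Nat.find_min (pvF_exists_gt n) h
    omega
  · intro h
    by_contra hc
    have hge : pvKstop n ≤ k := Nat.le_of_not_lt hc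
    have h2 : (pvF (pvKstop n) : Int) ≤ (pvF k : Int) := by exact_mod_cast pvF_mono hge
    have := pvKstop_gt n
    omega

lemma pvKstop_le (n : Int) : pvKstop n ≤ n.toNat + 1 := by
  by_contra h
  have h' : n.toNat + 1 < pvKstop n := Nat.lt_of_not_le h
  have := (lt_pvKstop_iff n (n.toNat + 1)).mp h'
  have h1 : (n.toNat + 1 : Nat) ≤ pvF (n.toNat + 1) := pvF_ge _
  have h2 : n ≤ (n.toNat : Int) := Int.self_le_toNat n
  have h3 := Nat.cast_le (α := Int) |>.mpr h1
  push_cast at h3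
  omega

-- ===== B helpers compute pvF and pvRot =====

lemma pvVAL_get (j : Nat) (hj : j < 5) :
    (PySem.List.pyGet? pvVALB ((j : Nat) : Int)).getD 0 = (pvVD j : Int) := by
  interval_cases j <;> decide

lemma pvDecodeGo_eq (t : Nat) : ∀ m p : Int, pvDecodeGo t m p = m + (pvF t : Int) * p := by
  induction t using Nat.strong_induction_on with
  | _ t ih =>
    intro m p
    rw [pvDecodeGo]
    rcases Nat.eq_zero_or_pos t with h | h
    · simp [h, pvF]
    · rw [if_neg (by omega)]
      rw [ih (t / 5) (Nat.div_lt_self h (by norm_num))]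
      rw [pvVAL_get (t % 5) (Nat.mod_lt _ (by norm_num))]
      rw [pvF_rec t (by omega)]
      push_cast
      ring

lemma pvROT_get (d : Nat) (hd : d = 0 ∨ d = 1 ∨ d = 6 ∨ d = 8 ∨ d = 9) :
    pvROTB.getD ((d : Nat) : Int) 0 = (pvRD d : Int) := by
  rcases hd with rfl | rfl | rfl | rfl | rfl <;> decide

lemma pvRot_zero : pvRot 0 = 0 := by simp [pvRot]

lemma pvRot_rec (t : Nat) (h : 0 < t) :
    pvRot t = pvRot (t / 10) + 10 ^ (Nat.digits 10 (t / 10)).length * pvRD (t % 10) := by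
  unfold pvRot
  rw [Nat.digits_def' (b := 10) (by norm_num) h]
  rw [List.map_cons, List.reverse_cons, Nat.ofDigits_append]
  simp [Nat.ofDigits_cons]

lemma pvValid_div (t : Nat) (hv : pvValid t) : pvValid (t / 10) := by
  intro d hd
  rcases Nat.eq_zero_or_pos t with h | h
  · simp [h] at hd
  · apply hv
    rw [Nat.digits_def' (b := 10) (by norm_num) h]
    simp [hd]

lemma pvValid_mod (t : Nat) (h : 0 < t) (hv : pvValid t) :
    t % 10 = 0 ∨ t % 10 = 1 ∨ t % 10 = 6 ∨ t % 10 = 8 ∨ t % 10 = 9 := by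
  apply hv
  rw [Nat.digits_def' (b := 10) (by norm_num) h]
  simp

lemma pvRotGoB_eq (t : Nat) : ∀ r : Int, pvValid t →
    pvRotGoB t r = r * 10 ^ (Nat.digits 10 t).length + (pvRot t : Int) := by
  induction t using Nat.strong_induction_on with
  | _ t ih =>
    intro r hv
    rw [pvRotGoB]
    rcases Nat.eq_zero_or_pos t with h | h
    · simp [h, pvRot_zero]
    · rw [if_neg (by omega)]
      rw [ih (t / 10) (Nat.div_lt_self h (by norm_num)) _ (pvValid_div t hv)]
      rw [pvROT_get (t % 10) (pvValid_mod t h hv)]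
      rw [pvRot_rec t h]
      rw [Nat.digits_def' (b := 10) (by norm_num) h]
      push_cast
      rw [List.length_cons]
      push_cast
      ring

-- ===== A's dfs: tree sum = level-by-level interval sums =====

lemma pvDfsA_of_gt (n : Int) (f : Nat) (c : Int) (h : c > n) : pvDfsA n f c = 0 := by
  cases f <;> simp [pvDfsA, h]

lemma pvDfsA_step (n : Int) (f k : Nat) (hk : 1 ≤ k) :
    pvDfsA n (f + 1) (pvF k) =
      (if (pvF k : Int) > n then 0 else if pvRot (pvF k) = pvF k then 0 else 1) +
      ∑ j ∈ Finset.range 5, pvDfsA n f (pvF (5 * k + j)) := by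
  have hk1 : (1 : Nat) ≤ pvF k := le_trans hk (pvF_ge k)
  have e0 : ((pvF k : Nat) : Int) * 10 + 0 = ((pvF (5 * k + 0) : Nat) : Int) := by
    rw [pvF_child k 0 (by norm_num)]; push_cast [show pvVD 0 = 0 from rfl]; ring
  have e1 : ((pvF k : Nat) : Int) * 10 + 1 = ((pvF (5 * k + 1) : Nat) : Int) := by
    rw [pvF_child k 1 (by norm_num)]; push_cast [show pvVD 1 = 1 from rfl]; ring
  have e2 : ((pvF k : Nat) : Int) * 10 + 6 = ((pvF (5 * k + 2) : Nat) : Int) := by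
    rw [pvF_child k 2 (by norm_num)]; push_cast [show pvVD 2 = 6 from rfl]; ring
  have e3 : ((pvF k : Nat) : Int) * 10 + 8 = ((pvF (5 * k + 3) : Nat) : Int) := by
    rw [pvF_child k 3 (by norm_num)]; push_cast [show pvVD 3 = 8 from rfl]; ring
  have e4 : ((pvF k : Nat) : Int) * 10 + 9 = ((pvF (5 * k + 4) : Nat) : Int) := by
    rw [pvF_child k 4 (by norm_num)]; push_cast [show pvVD 4 = 9 from rfl]; ring
  by_cases hgt : (pvF k : Int) > n
  · rw [pvDfsA_of_gt n _ _ hgt, if_pos hgt]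
    rw [Finset.sum_eq_zero, add_zero]
    intro j hj
    apply pvDfsA_of_gt
    have : pvF k ≤ pvF (5 * k + j) := pvF_mono (by omega)
    have : ((pvF k : Nat) : Int) ≤ ((pvF (5 * k + j) : Nat) : Int) := by exact_mod_cast this
    omega
  · rw [pvDfsA, if_neg hgt, if_neg hgt]
    have hbase : (if ((pvF k : Nat) : Int) ≠ 0 ∧ pvIsConfusingA ((pvF k : Nat) : Int) = true then (1:Int) else 0)
        = if pvRot (pvF k) = pvF k then 0 else 1 := by
      rw [pvIsConfusingA_eq (pvF k) (by omega) (pvValid_pvF k)]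
      by_cases hr : pvRot (pvF k) = pvF k
      · simp [hr]
      · have : ((pvF k : Nat) : Int) ≠ 0 := by
          have : (1 : Int) ≤ ((pvF k : Nat) : Int) := by exact_mod_cast hk1
          omega
        have hkn : ¬ pvF k = 0 := by omega
        simp [hr, hkn]
    simp only [List.foldl_cons, List.foldl_nil]
    have hne : ∀ d : Int, 0 ≤ d → (((pvF k : Nat) : Int) * 10 + d ≠ 0) := by
      intro d hd
      have : (1 : Int) ≤ ((pvF k : Nat) : Int) := by exact_mod_cast hk1
      omega
    rw [hbase]
    simp only [Finset.sum_range_succ, Finset.sum_range_zero]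
    simp [hne 0 (by norm_num), hne 1 (by norm_num), hne 6 (by norm_num),
          hne 8 (by norm_num), hne 9 (by norm_num)]
    have hkn : ¬ pvF k = 0 := by omega
    rw [if_neg hkn]
    have e0' : ((pvF k : Nat) : Int) * 10 = ((pvF (5 * k) : Nat) : Int) := by
      rw [show 5 * k = 5 * k + 0 from rfl, ← e0]; ring
    rw [e0']
    have e1' : ((pvF (5 * k) : Nat) : Int) + 1 = ((pvF (5 * k + 1) : Nat) : Int) := by rw [← e0', ← e1]
    have e2' : ((pvF (5 * k) : Nat) : Int) + 6 = ((pvF (5 * k + 2) : Nat) : Int) := by rw [← e0', ← e2]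
    have e3' : ((pvF (5 * k) : Nat) : Int) + 8 = ((pvF (5 * k + 3) : Nat) : Int) := by rw [← e0', ← e3]
    have e4' : ((pvF (5 * k) : Nat) : Int) + 9 = ((pvF (5 * k + 4) : Nat) : Int) := by rw [← e0', ← e4]
    rw [e1', e2', e3', e4']
    ring

lemma pvBlockSum' (g : Nat → Int) (a b : Nat) (hab : a ≤ b) :
    ∑ k ∈ Finset.Ico (5 * a) (5 * b), g k =
      ∑ k ∈ Finset.Ico a b, ∑ j ∈ Finset.range 5, g (5 * k + j) := by
  induction b with
  | zero =>
    have : a = 0 := by omega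
    simp [this]
  | succ b ih =>
    rcases Nat.lt_or_ge b a with h | h
    · have : a = b + 1 := by omega
      simp [this]
    · rw [Finset.sum_Ico_succ_top h]
      rw [← ih h]
      have h5 : 5 * b ≤ 5 * (b + 1) := by omega
      have h5' : 5 * a ≤ 5 * b := by omega
      rw [← Finset.sum_Ico_consecutive g h5' h5]
      congr 1
      rw [Finset.sum_Ico_eq_sum_range]
      have : 5 * (b + 1) - 5 * b = 5 := by omega
      rw [this]

lemma pvDfsA_level (n : Int) : ∀ (f : Nat) (a b : Nat), 1 ≤ a → a ≤ b →
    ∑ k ∈ Finset.Ico a b, pvDfsA n f ((pvF k : Nat) : Int) =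
      ∑ j ∈ Finset.range f, pvS n (a * 5 ^ j) (b * 5 ^ j) := by
  intro f
  induction f with
  | zero =>
    intro a b _ _
    simp [pvDfsA]
  | succ f ih =>
    intro a b ha hab
    have hstep : ∀ k ∈ Finset.Ico a b,
        pvDfsA n (f + 1) ((pvF k : Nat) : Int) =
          (if (pvF k : Int) > n then 0 else if pvRot (pvF k) = pvF k then 0 else 1) +
          ∑ j ∈ Finset.range 5, pvDfsA n f ((pvF (5 * k + j) : Nat) : Int) := by
      intro k hk
      have := Finset.mem_Ico.mp hk
      exact pvDfsA_step n f k (by omega)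
    rw [Finset.sum_congr rfl hstep, Finset.sum_add_distrib]
    have h1 : ∑ k ∈ Finset.Ico a b,
        (if (pvF k : Int) > n then 0 else if pvRot (pvF k) = pvF k then 0 else 1) = pvS n a b := rfl
    rw [h1, ← pvBlockSum' (fun k => pvDfsA n f ((pvF k : Nat) : Int)) a b hab]
    rw [ih (5 * a) (5 * b) (by omega) (by omega)]
    rw [Finset.sum_range_succ']
    have h2 : ∀ j, pvS n (5 * a * 5 ^ j) (5 * b * 5 ^ j) = pvS n (a * 5 ^ (j + 1)) (b * 5 ^ (j + 1)) := by
      intro j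
      have ea : 5 * a * 5 ^ j = a * 5 ^ (j + 1) := by ring
      have eb : 5 * b * 5 ^ j = b * 5 ^ (j + 1) := by ring
      rw [ea, eb]
    rw [Finset.sum_congr rfl (fun j _ => h2 j)]
    simp [add_comm]

lemma pvTelescope (n : Int) (f : Nat) :
    ∑ j ∈ Finset.range f, pvS n (1 * 5 ^ j) (5 * 5 ^ j) = pvS n 1 (5 ^ f) := by
  induction f with
  | zero => simp [pvS]
  | succ f ih =>
    rw [Finset.sum_range_succ, ih]
    have e1 : (1 : Nat) * 5 ^ f = 5 ^ f := by ring
    have e2 : (5 : Nat) * 5 ^ f = 5 ^ (f + 1) := by ring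
    rw [e1, e2]
    unfold pvS
    apply Finset.sum_Ico_consecutive
    · exact Nat.one_le_pow _ _ (by norm_num)
    · exact Nat.pow_le_pow_right (by norm_num) (by omega)

lemma pvS_high (n : Int) (a b : Nat) (ha : pvKstop n ≤ a) : pvS n a b = 0 := by
  apply Finset.sum_eq_zero
  intro k hk
  have hm := Finset.mem_Ico.mp hk
  have hgt : (pvF k : Int) > n := by
    by_contra h
    have := (lt_pvKstop_iff n k).mpr (by omega)
    omega
  rw [if_pos hgt]

lemma pvLoopB_eq (n : Int) : ∀ (f k : Nat) (count : Int), 1 ≤ k → pvKstop n + 1 ≤ f + k →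
    pvLoopB n f k count = count + pvS n k (pvKstop n) := by
  intro f
  induction f with
  | zero =>
    intro k count hk hf
    rw [pvLoopB, pvS_high n k (pvKstop n) (by omega)]
    ring
  | succ f ih =>
    intro k count hk hf
    rw [pvLoopB]
    simp only [pvDecodeGo_eq k 0 1]
    have hm : (0 : Int) + (pvF k : Int) * 1 = (pvF k : Int) := by ring
    rw [hm]
    by_cases hgt : (pvF k : Int) > n
    · rw [if_pos hgt]
      have hks : pvKstop n ≤ k := by
        by_contra h
        have := (lt_pvKstop_iff n k).mp (by omega)
        omega
      rw [pvS_high n k (pvKstop n) hks]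
      ring
    · rw [if_neg hgt]
      have hklt : k < pvKstop n := (lt_pvKstop_iff n k).mpr (by omega)
      have htn : ((pvF k : Int)).toNat = pvF k := by simp
      rw [htn]
      rw [pvRotGoB_eq (pvF k) 0 (pvValid_pvF k)]
      have hr0 : (0 : Int) * 10 ^ (Nat.digits 10 (pvF k)).length + (pvRot (pvF k) : Int)
          = (pvRot (pvF k) : Int) := by ring
      rw [hr0]
      rw [ih (k + 1) _ (by omega) (by omega)]
      have hsplit : pvS n k (pvKstop n) =
          (if (pvF k : Int) > n then 0 else if pvRot (pvF k) = pvF k then 0 else 1) +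
            pvS n (k + 1) (pvKstop n) := by
        unfold pvS
        rw [Finset.sum_eq_sum_Ico_succ_bot hklt]
      rw [hsplit, if_neg hgt]
      by_cases hreq : pvRot (pvF k) = pvF k
      · rw [if_pos hreq,
            if_neg (show ¬ ((pvRot (pvF k) : Int) ≠ ((pvF k : Nat) : Int)) from by simp [hreq])]
        ring
      · have : (pvRot (pvF k) : Int) ≠ ((pvF k : Nat) : Int) := by exact_mod_cast hreq
        rw [if_neg hreq, if_pos this]
        ring

lemma pvF_one : pvF 1 = 1 := by decide
lemma pvF_two : pvF 2 = 6 := by decide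
lemma pvF_three : pvF 3 = 8 := by decide
lemma pvF_four : pvF 4 = 9 := by decide

lemma confusingNumberII_eq (n : Int) : confusingNumberII n = pvS n 1 (5 ^ (n.toNat + 2)) := by
  rw [← pvTelescope n (n.toNat + 2)]
  rw [← pvDfsA_level n (n.toNat + 2) 1 5 (by norm_num) (by norm_num)]
  unfold confusingNumberII
  rw [Finset.sum_Ico_eq_sum_range]
  simp only [List.foldl_cons, List.foldl_nil, Finset.sum_range_succ, Finset.sum_range_zero]
  norm_num [pvF_one, pvF_two, pvF_three, pvF_four]

lemma confusingNumberII_alt_eq (n : Int) : confusingNumberII_alt n = pvS n 1 (pvKstop n) := by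
  unfold confusingNumberII_alt
  rw [pvLoopB_eq n (n.toNat + 2) 1 0 (by norm_num) (by have := pvKstop_le n; omega)]
  ring

-- ===== VERDICT (by name: the statement is the Claim_ definition above) =====
theorem confusingNumberII_spec : Claim_equal_confusingNumberII := by
  intro n _
  show confusingNumberII n = confusingNumberII_alt n
  rw [confusingNumberII_eq, confusingNumberII_alt_eq]
  have hks : pvKstop n ≤ 5 ^ (n.toNat + 2) := by
    have h1 := pvKstop_le n
    have h2 : n.toNat + 2 < 5 ^ (n.toNat + 2) := Nat.lt_pow_self (by norm_num)
    omega
  rcases Nat.lt_or_ge (pvKstop n) 1 with h1 | h1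
  · have h0 : pvKstop n = 0 := by omega
    rw [h0]
    rw [pvS_high n 1 (5 ^ (n.toNat + 2)) (by omega)]
    simp [pvS]
  · have hsplit : pvS n 1 (5 ^ (n.toNat + 2)) =
        pvS n 1 (pvKstop n) + pvS n (pvKstop n) (5 ^ (n.toNat + 2)) := by
      unfold pvS
      exact (Finset.sum_Ico_consecutive _ h1 hks).symm
    rw [hsplit, pvS_high n (pvKstop n) _ (le_refl _), add_zero]
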